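-- pv_equiv track=rewrite | github.com/sergeikabuldzhanov/Sprint-Challenge--Graphs | adv.py | convert_id_path_to_directions
-- ===== SOURCE A (Python) =====
-- def convert_id_path_to_directions(id_path, direction_graph):
--     direction_path = []
--     for i in range(len(id_path)-1):
--         current = id_path[i]
--         target = id_path[i+1]
--         direction = [direction for direction in direction_graph[current] if direction_graph[current][direction]==target]
--         direction_path.extend(direction)
--     return direction_path
-- ===== SOURCE B (Python) =====
-- def convert_id_path_to_directions(id_path, direction_graph):
--     # Precompute a reverse index: node -> {target: [directions in dict order]}
--     rev = {}
--     for node, dirs in direction_graph.items():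
--         table = {}
--         for direction, dest in dirs.items():
--             table.setdefault(dest, []).append(direction)
--         rev[node] = table
--     out = []
--     for cur, tgt in zip(id_path, id_path[1:]):
--         out.extend(rev[cur].get(tgt, []))
--     return out
-- ===== Notes on version B (the rewrite author's own statement) =====
-- stated objective: alternative
-- what changed: B precomputes a reverse index (node -> target -> list of directions) in one pass over the graph and then walks consecutive path pairs with a single table lookup each, instead of A's per-pair linear scan over the current room's direction dict; the index-based loop over range(len-1) is replaced by zipping the path with its tail.
import Mathlib
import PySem

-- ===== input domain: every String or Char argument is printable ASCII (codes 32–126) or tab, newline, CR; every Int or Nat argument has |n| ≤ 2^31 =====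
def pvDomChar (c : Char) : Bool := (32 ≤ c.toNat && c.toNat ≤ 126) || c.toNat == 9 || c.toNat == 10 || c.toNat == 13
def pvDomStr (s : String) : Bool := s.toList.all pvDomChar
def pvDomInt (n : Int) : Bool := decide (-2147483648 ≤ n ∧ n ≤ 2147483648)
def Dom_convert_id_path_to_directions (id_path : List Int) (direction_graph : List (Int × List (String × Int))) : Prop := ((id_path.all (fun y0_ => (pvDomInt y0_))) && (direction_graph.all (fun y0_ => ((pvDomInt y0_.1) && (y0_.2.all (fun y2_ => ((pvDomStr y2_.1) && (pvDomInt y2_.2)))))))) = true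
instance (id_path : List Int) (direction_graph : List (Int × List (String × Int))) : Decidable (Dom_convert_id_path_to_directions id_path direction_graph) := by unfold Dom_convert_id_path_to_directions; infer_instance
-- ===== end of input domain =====

-- B builds a reverse index (node -> target -> directions) once and then walks consecutive path
-- pairs with a single lookup each, instead of A's per-pair scan of the current room's dict.

-- ===== PORT A =====
def convert_id_path_to_directions (id_path : List Int) (direction_graph : List (Int × List (String × Int))) : List String :=
  (PySem.List.pyRange 0 ((id_path.length : Int) - 1) 1).foldl
    (fun direction_path i =>
      let current := PySem.List.pyGetD id_path i 0
      let target := PySem.List.pyGetD id_path (i + 1) 0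
      let room := (PySem.Dict.mk direction_graph).getD current []
      direction_path ++
        (room.map Prod.fst).filter (fun d => (PySem.Dict.mk room).getD d 0 == target)) []

-- ===== PORT B =====
-- inner loop of B: table.setdefault(dest, []).append(direction)
def pvRevTable (dirs : List (String × Int)) : PySem.Dict Int (List String) :=
  dirs.foldl (fun t p => t.modify p.2 [] (· ++ [p.1])) PySem.Dict.empty

def convert_id_path_to_directions_alt (id_path : List Int) (direction_graph : List (Int × List (String × Int))) : List String :=
  let rev := direction_graph.foldl (fun r p => r.insert p.1 (pvRevTable p.2)) PySem.Dict.empty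
  (id_path.zip id_path.tail).foldl
    (fun out pr => out ++ ((rev.getD pr.1 PySem.Dict.empty).getD pr.2 [])) []

-- ===== PRECONDITION & SPEC =====
-- Pre_ excludes (a) inputs where some non-final path node is not a key of the graph, on which A
-- raises KeyError, and (b) association lists with duplicate keys (outer or inner), which cannot
-- represent a Python dict, the declared type of direction_graph.
def Pre_convert_id_path_to_directions (id_path : List Int) (direction_graph : List (Int × List (String × Int))) : Prop :=
  (∀ x ∈ id_path.dropLast, x ∈ direction_graph.map Prod.fst) ∧
  (direction_graph.map Prod.fst).Nodup ∧
  (∀ p ∈ direction_graph, (p.2.map Prod.fst).Nodup)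
instance (id_path : List Int) (direction_graph : List (Int × List (String × Int))) : Decidable (Pre_convert_id_path_to_directions id_path direction_graph) := by unfold Pre_convert_id_path_to_directions; infer_instance

def pvWitness_convert_id_path_to_directions : List Int × (List (Int × List (String × Int))) :=
  ([0, 1, 0], [(0, [("n", 1)]), (1, [("s", 0)])])

def Spec_convert_id_path_to_directions (id_path : List Int) (direction_graph : List (Int × List (String × Int))) (out : List String) : Prop := out = convert_id_path_to_directions_alt id_path direction_graph
instance (id_path : List Int) (direction_graph : List (Int × List (String × Int))) (out : List String) : Decidable (Spec_convert_id_path_to_directions id_path direction_graph out) := by unfold Spec_convert_id_path_to_directions; infer_instance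

-- ===== CLAIM (what is proved, stated in full; the proofs are below) =====
def Claim_equal_convert_id_path_to_directions : Prop := ∀ (id_path : List Int) (direction_graph : List (Int × List (String × Int))), Dom_convert_id_path_to_directions id_path direction_graph → Pre_convert_id_path_to_directions id_path direction_graph → Spec_convert_id_path_to_directions id_path direction_graph (convert_id_path_to_directions id_path direction_graph)

-- ===== LEMMAS AND PROOFS =====

-- first-match lookup in a duplicate-free association list returns the entry's own value
theorem getD_mk_of_mem_nodup {ν : Type} (room : List (String × ν)) (hnd : (room.map Prod.fst).Nodup)
    (p : String × ν) (hp : p ∈ room) (d : ν) : (PySem.Dict.mk room).getD p.1 d = p.2 := by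
  apply PySem.Dict.getD_of_mem_items (k := p.1) (v := p.2)
  · simpa [PySem.Dict.items] using hp
  · simpa [PySem.Dict.keys, PySem.Dict.items] using hnd

-- A's per-pair scan, under unique inner keys, is a filter on the entries
theorem apair_eq (room : List (String × Int)) (hnd : (room.map Prod.fst).Nodup) (tgt : Int) :
    (room.map Prod.fst).filter (fun d => (PySem.Dict.mk room).getD d 0 == tgt)
      = (room.filter (fun p => p.2 == tgt)).map Prod.fst := by
  rw [List.filter_map]
  congr 1
  apply List.filter_congr
  intro p hp
  simp only [Function.comp_apply]
  rw [getD_mk_of_mem_nodup room hnd p hp]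

-- B's reverse table looked up at tgt is the same filter
theorem revTable_getD (room : List (String × Int)) (tgt : Int) :
    (pvRevTable room).getD tgt [] = (room.filter (fun p => p.2 == tgt)).map Prod.fst := by
  unfold pvRevTable
  rw [show room.foldl (fun t p => t.modify p.2 [] (· ++ [p.1])) PySem.Dict.empty
      = (room.map Prod.swap).foldl (fun t p => t.modify p.1 [] (· ++ [p.2])) PySem.Dict.empty from by
    rw [List.foldl_map]; rfl]
  rw [PySem.Dict.getD_foldl_modify_append]
  simp [List.filter_map, Function.comp_def]

-- B's outer index, built by inserting fresh distinct keys, looked up with get?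
theorem rev_get? (dg : List (Int × List (String × Int)))
    (f : List (String × Int) → PySem.Dict Int (List String))
    (hnd : (dg.map Prod.fst).Nodup) (c : Int) :
    (dg.foldl (fun r p => r.insert p.1 (f p.2)) PySem.Dict.empty).get? c
      = Option.map f ((PySem.Dict.mk dg).get? c) := by
  have hitems := PySem.Dict.items_foldl_insert_fresh (l := dg) (k := Prod.fst)
    (v := fun p => f p.2) (d := PySem.Dict.empty) (by simp) (by simpa using hnd)
  have heq : dg.foldl (fun r p => r.insert p.1 (f p.2)) PySem.Dict.empty
      = PySem.Dict.mk (dg.map (fun p => (p.1, f p.2))) := by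
    apply PySem.Dict.ext
    simpa [PySem.Dict.items] using hitems
  rw [heq]
  clear hitems heq hnd
  induction dg with
  | nil => simp [PySem.Dict.get?]
  | cons q rest ih =>
    simp only [List.map_cons]
    rw [PySem.Dict.get?_mk_cons,
        show (q :: rest) = ((q.1, q.2) :: rest) from by simp, PySem.Dict.get?_mk_cons]
    by_cases hq : (q.1 == c) = true
    · simp [hq]
    · simp only [hq]; simpa using ih

theorem exists_of_get?_mk {κ ν : Type} [BEq κ] (l : List (κ × ν)) (c : κ) (v : ν)
    (h : (PySem.Dict.mk l).get? c = some v) : ∃ p ∈ l, p.2 = v := by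
  induction l with
  | nil => simp [PySem.Dict.get?] at h
  | cons q rest ih =>
    rw [show (q :: rest) = ((q.1, q.2) :: rest) from by simp] at h
    rw [PySem.Dict.get?_mk_cons] at h
    by_cases hq : (q.1 == c) = true
    · simp [hq] at h; exact ⟨q, by simp, h⟩
    · simp [hq] at h
      obtain ⟨p, hp, hv⟩ := ih h
      exact ⟨p, by simp [hp], hv⟩

theorem get?_mk_isSome {κ ν : Type} [BEq κ] [LawfulBEq κ] (l : List (κ × ν)) (c : κ)
    (h : c ∈ l.map Prod.fst) : ∃ v, (PySem.Dict.mk l).get? c = some v := by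
  induction l with
  | nil => simp at h
  | cons q rest ih =>
    rw [show (q :: rest) = ((q.1, q.2) :: rest) from by simp]
    rw [PySem.Dict.get?_mk_cons]
    by_cases hq : (q.1 == c) = true
    · exact ⟨q.2, by simp [hq]⟩
    · simp at h hq
      rcases h with h | h
      · exact absurd h.symm hq
      · simpa [hq] using ih (by simpa using h)

theorem fst_mem_dropLast_of_mem_zip (l : List Int) (pr : Int × Int) (h : pr ∈ l.zip l.tail) :
    pr.1 ∈ l.dropLast := by
  induction l with
  | nil => simp at h
  | cons a t ih =>
    cases t with
    | nil => simp at h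
    | cons b t' =>
      simp only [List.tail_cons, List.zip_cons_cons, List.mem_cons] at h
      rcases h with h | h
      · simp [h]
      · have := ih (by simpa using h)
        rw [List.dropLast_cons_of_ne_nil (by simp)]
        simpa using Or.inr this

-- the index loop's pair sequence is the zip of the path with its tail
theorem pairs_eq (id_path : List Int) :
    (PySem.List.pyRange 0 ((id_path.length : Int) - 1) 1).map
        (fun i => (PySem.List.pyGetD id_path i 0, PySem.List.pyGetD id_path (i + 1) 0))
      = id_path.zip id_path.tail := by
  rw [PySem.List.pyRange_one]
  rw [List.map_map]
  apply List.ext_getElem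
  · simp [List.length_zip]
  · intro k hk1 hk2
    simp only [List.getElem_map, List.getElem_range, Function.comp_apply]
    simp only [List.length_map, List.length_range] at hk1
    have hk : k < id_path.length - 1 := by omega
    have h1 : (0 : Int) + (k : Int) = (k : Nat) := by omega
    rw [h1]
    have h2 : ((k : Nat) : Int) + 1 = ((k + 1 : Nat) : Int) := by omega
    rw [h2]
    rw [PySem.List.pyGetD_natCast, PySem.List.pyGetD_natCast]
    rw [List.getElem_zip]
    simp [List.getD_eq_getElem?_getD, List.getElem?_eq_getElem (by omega : k < id_path.length),
      List.getElem?_eq_getElem (show k + 1 < id_path.length by omega),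
      List.getElem_tail]

-- ===== VERDICT (by name: the statement is the Claim_ definition above) =====
theorem convert_id_path_to_directions_spec : Claim_equal_convert_id_path_to_directions := by
  intro id_path dg _ hpre
  obtain ⟨hkeys, hndout, hndin⟩ := hpre
  unfold Spec_convert_id_path_to_directions
  unfold convert_id_path_to_directions convert_id_path_to_directions_alt
  simp only [PySem.List.foldl_append_eq_flatMap, List.nil_append]
  rw [show (PySem.List.pyRange 0 ((id_path.length : Int) - 1) 1).flatMap
        (fun i =>
          ((PySem.Dict.mk dg).getD (PySem.List.pyGetD id_path i 0) []).map Prod.fst |>.filter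
            (fun d => (PySem.Dict.mk ((PySem.Dict.mk dg).getD (PySem.List.pyGetD id_path i 0) [])).getD d 0
                == PySem.List.pyGetD id_path (i + 1) 0))
      = ((PySem.List.pyRange 0 ((id_path.length : Int) - 1) 1).map
          (fun i => (PySem.List.pyGetD id_path i 0, PySem.List.pyGetD id_path (i + 1) 0))).flatMap
          (fun pr =>
            ((PySem.Dict.mk dg).getD pr.1 []).map Prod.fst |>.filter
              (fun d => (PySem.Dict.mk ((PySem.Dict.mk dg).getD pr.1 [])).getD d 0 == pr.2))
      from by rw [List.flatMap_map]]
  rw [pairs_eq]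
  apply List.flatMap_congr
  intro pr hpr
  have hcur : pr.1 ∈ dg.map Prod.fst := hkeys _ (fst_mem_dropLast_of_mem_zip _ _ hpr)
  obtain ⟨room, hroom⟩ := get?_mk_isSome dg pr.1 hcur
  have hroomD : (PySem.Dict.mk dg).getD pr.1 [] = room := by
    apply PySem.Dict.getD_of_get?_eq_some
    exact hroom
  obtain ⟨p, hpdg, hp2⟩ := exists_of_get?_mk dg pr.1 room hroom
  have hndroom : (room.map Prod.fst).Nodup := hp2 ▸ hndin p hpdg
  have hrevD : ((dg.foldl (fun r p => r.insert p.1 (pvRevTable p.2)) PySem.Dict.empty).getD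
      pr.1 PySem.Dict.empty) = pvRevTable room := by
    apply PySem.Dict.getD_of_get?_eq_some
    rw [rev_get? dg pvRevTable hndout pr.1, hroom]; rfl
  rw [hroomD, hrevD, apair_eq room hndroom pr.2, revTable_getD]
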